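-- pv_equiv track=rewrite | github.com/irsiksoftware/PublicWebsite | implementer_find_issue.py | get_priority_value
-- ===== SOURCE A (Python) =====
-- def get_priority_value(labels):
--     """Get priority value for sorting (lower is higher priority)."""
--     label_names = [label['name'].lower() for label in labels]
--
--     if 'critical' in label_names:
--         return 1
--     elif 'urgent' in label_names:
--         return 2
--     elif 'high' in label_names:
--         return 3
--     elif 'medium' in label_names:
--         return 4
--     elif 'low' in label_names:
--         return 5
--     else:
--         return 6  # No priority label
-- ===== SOURCE B (Python) =====
-- PRIORITY_RANK = {'critical': 1, 'urgent': 2, 'high': 3, 'medium': 4, 'low': 5}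
--
--
-- def get_priority_value(labels):
--     """Get priority value for sorting (lower is higher priority)."""
--     ranks = [PRIORITY_RANK.get(label['name'].lower()) for label in labels]
--     return min((r for r in ranks if r is not None), default=6)
-- ===== Notes on version B (the rewrite author's own statement) =====
-- stated objective: simpler
-- what changed: Replaces the five-way fixed-order membership-test chain (each a full scan of the name list) with a rank table and a single min-reduction over the per-label ranks with default 6.
import Mathlib
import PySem

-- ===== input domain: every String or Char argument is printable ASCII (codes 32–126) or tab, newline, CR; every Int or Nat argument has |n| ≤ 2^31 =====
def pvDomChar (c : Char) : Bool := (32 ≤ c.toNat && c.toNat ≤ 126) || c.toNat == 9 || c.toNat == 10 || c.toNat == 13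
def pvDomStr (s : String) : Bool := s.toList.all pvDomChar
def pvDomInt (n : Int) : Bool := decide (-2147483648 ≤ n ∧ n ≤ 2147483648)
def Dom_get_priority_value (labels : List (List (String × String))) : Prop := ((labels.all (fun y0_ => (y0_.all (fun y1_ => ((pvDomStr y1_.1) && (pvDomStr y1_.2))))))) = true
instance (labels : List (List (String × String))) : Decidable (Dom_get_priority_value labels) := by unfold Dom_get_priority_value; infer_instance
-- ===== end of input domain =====

-- B replaces A's fixed-order chain of five membership scans by a rank table and a single
-- min-reduction with default 6 (objective: simpler; same return value everywhere both return).

-- ===== PORT A =====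
-- label['name'].lower() ; Pre_ guarantees the key is present, so getD "" is never the taken branch
def pvName (label : List (String × String)) : String :=
  PySem.Str.lower (((PySem.Dict.mk label).get? "name").getD "")

def get_priority_value (labels : List (List (String × String))) : Int :=
  let label_names := labels.map pvName
  if "critical" ∈ label_names then 1
  else if "urgent" ∈ label_names then 2
  else if "high" ∈ label_names then 3
  else if "medium" ∈ label_names then 4
  else if "low" ∈ label_names then 5
  else 6

-- ===== PORT B =====
-- PRIORITY_RANK.get(name)
def pvRank? (n : String) : Option Int :=
  (PySem.Dict.mk [("critical", (1:Int)), ("urgent", 2), ("high", 3), ("medium", 4), ("low", 5)]).get? n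

def get_priority_value_alt (labels : List (List (String × String))) : Int :=
  let ranks := labels.map (fun label => pvRank? (pvName label))
  -- min(..., default=6) over the non-None ranks
  (ranks.filterMap id).foldl min 6

-- ===== PRECONDITION & SPEC =====
-- Pre_ excludes labels missing the 'name' key, on which both Pythons raise KeyError.
def Pre_get_priority_value (labels : List (List (String × String))) : Prop :=
  (labels.all (fun label => (PySem.Dict.mk label).contains "name")) = true
instance (labels : List (List (String × String))) : Decidable (Pre_get_priority_value labels) := by unfold Pre_get_priority_value; infer_instance
def pvWitness_get_priority_value : (List (List (String × String))) := [[("name", "High")], [("name", "bug")]]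
def Spec_get_priority_value (labels : List (List (String × String))) (out : Int) : Prop := out = get_priority_value_alt labels
instance (labels : List (List (String × String))) (out : Int) : Decidable (Spec_get_priority_value labels out) := by unfold Spec_get_priority_value; infer_instance

-- ===== CLAIM (what is proved, stated in full; the proofs are below) =====
def Claim_equal_get_priority_value : Prop := ∀ (labels : List (List (String × String))), Dom_get_priority_value labels → Pre_get_priority_value labels → Spec_get_priority_value labels (get_priority_value labels)

-- ===== LEMMAS AND PROOFS =====

-- A's chain, as a function of the name list
def pvChain (ns : List String) : Int :=
  if "critical" ∈ ns then 1
  else if "urgent" ∈ ns then 2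
  else if "high" ∈ ns then 3
  else if "medium" ∈ ns then 4
  else if "low" ∈ ns then 5
  else 6

lemma pvChain_le (ns : List String) : pvChain ns ≤ 6 := by
  unfold pvChain; split_ifs <;> omega

lemma pvRank?_eq_none (n : String) (h1 : n ≠ "critical") (h2 : n ≠ "urgent")
    (h3 : n ≠ "high") (h4 : n ≠ "medium") (h5 : n ≠ "low") : pvRank? n = none := by
  have c1 : ("critical" == n) = false := by simp; exact Ne.symm h1
  have c2 : ("urgent" == n) = false := by simp; exact Ne.symm h2
  have c3 : ("high" == n) = false := by simp; exact Ne.symm h3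
  have c4 : ("medium" == n) = false := by simp; exact Ne.symm h4
  have c5 : ("low" == n) = false := by simp; exact Ne.symm h5
  simp [pvRank?, PySem.Dict.get?, List.find?, c1, c2, c3, c4, c5]

lemma pvRank?_le (n : String) (v : Int) (h : pvRank? n = some v) : v ≤ 5 := by
  unfold pvRank? PySem.Dict.get? at h
  simp only [List.find?] at h
  repeat' split at h
  all_goals simp_all
  all_goals omega

lemma pvChain_cons (n : String) (ns : List String) :
    pvChain (n :: ns) = min ((pvRank? n).getD 6) (pvChain ns) := by
  have hle := pvChain_le ns
  by_cases h1 : n = "critical" <;> by_cases h2 : n = "urgent" <;> by_cases h3 : n = "high" <;>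
    by_cases h4 : n = "medium" <;> by_cases h5 : n = "low" <;> subst_eqs <;>
    first
      | (rw [pvRank?_eq_none n h1 h2 h3 h4 h5]
         simp only [pvChain, List.mem_cons, Ne.symm h1, Ne.symm h2, Ne.symm h3, Ne.symm h4,
           Ne.symm h5, false_or, Option.getD_none]
         split_ifs <;> omega)
      | (simp only [pvChain, List.mem_cons, pvRank?, PySem.Dict.get?, List.find?]
         simp
         split_ifs <;> omega)

lemma pvFold_eq (ns : List String) (acc : Int) (hacc : acc ≤ 6) :
    (ns.filterMap pvRank?).foldl min acc = min acc (pvChain ns) := by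
  induction ns generalizing acc with
  | nil => simpa [pvChain] using (min_eq_left hacc).symm
  | cons n ns ih =>
    rw [pvChain_cons]
    cases hr : pvRank? n with
    | none =>
      simp only [List.filterMap_cons, hr]
      rw [ih acc hacc]
      have := pvChain_le ns
      simp only [Option.getD_none]
      omega
    | some v =>
      have hv := pvRank?_le n v hr
      simp only [List.filterMap_cons, hr]
      rw [List.foldl_cons, ih (min acc v) (by omega)]
      simp only [Option.getD_some]
      omega

-- ===== VERDICT (by name: the statement is the Claim_ definition above) =====
theorem get_priority_value_spec : Claim_equal_get_priority_value := by
  intro labels _ _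
  unfold Spec_get_priority_value
  have hA : get_priority_value labels = pvChain (labels.map pvName) := rfl
  have hB : get_priority_value_alt labels
      = ((labels.map pvName).filterMap pvRank?).foldl min 6 := by
    unfold get_priority_value_alt
    simp [List.filterMap_map, Function.comp]
  rw [hA, hB, pvFold_eq _ 6 le_rfl]
  have := pvChain_le (labels.map pvName)
  omega
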